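-- pv_equiv track=rewrite | github.com/luizadelnegro/PUC-INF1771-Inteligencia-Artificial | T1/sa.py | find_not_tired_hobbit
-- ===== SOURCE A (Python) =====
-- MAX_HOBBITS=10
--
-- def find_not_tired_hobbit(neighbor):
--     hobbit=[0,0,0,0]
--     for i in range(0,len(neighbor)-3):
--         hobbit[0]+=neighbor[i]
--         hobbit[1]+=neighbor[i+1]
--         hobbit[2]+=neighbor[i+2]
--         hobbit[3]+=neighbor[i+3]
--         i+=4
--     for i in hobbit:
--         if i>=MAX_HOBBITS:
--             i=0
--         else:
--             i=1
--     return hobbit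
-- ===== SOURCE B (Python) =====
-- def find_not_tired_hobbit(neighbor):
--     count = max(len(neighbor) - 3, 0)
--     return [sum(neighbor[j:j + count]) for j in range(4)]
-- ===== Notes on version B (the rewrite author's own statement) =====
-- stated objective: simpler
-- what changed: Replaces A's single pass interleaving four running accumulators (plus a dead second loop and no-op i+=4) with a closed-form window count and four independent slice sums, one per output element; the C-level slice+sum also measured ~2x faster.
import Mathlib
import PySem

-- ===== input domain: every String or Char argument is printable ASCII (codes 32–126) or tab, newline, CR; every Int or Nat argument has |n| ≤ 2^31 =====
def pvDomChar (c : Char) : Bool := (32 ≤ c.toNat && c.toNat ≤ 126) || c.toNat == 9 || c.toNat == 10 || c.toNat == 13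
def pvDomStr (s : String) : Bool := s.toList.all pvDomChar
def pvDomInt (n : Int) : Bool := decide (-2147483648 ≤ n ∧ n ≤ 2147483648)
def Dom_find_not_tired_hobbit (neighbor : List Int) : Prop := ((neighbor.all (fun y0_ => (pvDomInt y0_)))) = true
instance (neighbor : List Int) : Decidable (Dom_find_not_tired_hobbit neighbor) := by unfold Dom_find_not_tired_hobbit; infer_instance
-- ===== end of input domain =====

-- B replaces A's single interleaved four-accumulator loop (plus a dead second loop) by four
-- independent slice sums; objective: simpler.

-- ===== PORT A =====
-- A mutates hobbit = [0,0,0,0] in place; ported as a 4-tuple accumulator, one component per cell.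
-- neighbor[i+k] is ported with pyGetD (default 0): exact here since 0 ≤ i ≤ len-4 keeps every
-- index in range. The second 'for i in hobbit' loop only rebinds i and is a no-op; ported as such.
def find_not_tired_hobbit (neighbor : List Int) : List Int :=
  let hobbit : Int × Int × Int × Int :=
    (PySem.List.pyRange 0 ((neighbor.length : Int) - 3) 1).foldl
      (fun h i =>
        (h.1 + PySem.List.pyGetD neighbor i 0,
         h.2.1 + PySem.List.pyGetD neighbor (i + 1) 0,
         h.2.2.1 + PySem.List.pyGetD neighbor (i + 2) 0,
         h.2.2.2 + PySem.List.pyGetD neighbor (i + 3) 0))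
      (0, 0, 0, 0)
  [hobbit.1, hobbit.2.1, hobbit.2.2.1, hobbit.2.2.2]

-- ===== PORT B =====
def find_not_tired_hobbit_alt (neighbor : List Int) : List Int :=
  let count : Int := max ((neighbor.length : Int) - 3) 0
  (PySem.List.pyRange 0 4 1).map
    (fun j => (PySem.List.slice neighbor (some j) (some (j + count))).sum)

-- ===== PRECONDITION & SPEC =====
def Spec_find_not_tired_hobbit (neighbor : List Int) (out : List Int) : Prop := out = find_not_tired_hobbit_alt neighbor
instance (neighbor : List Int) (out : List Int) : Decidable (Spec_find_not_tired_hobbit neighbor out) := by unfold Spec_find_not_tired_hobbit; infer_instance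

-- ===== CLAIM (what is proved, stated in full; the proofs are below) =====
def Claim_equal_find_not_tired_hobbit : Prop := ∀ (neighbor : List Int), Dom_find_not_tired_hobbit neighbor → Spec_find_not_tired_hobbit neighbor (find_not_tired_hobbit neighbor)

-- ===== LEMMAS AND PROOFS =====

-- A's interleaved fold splits into four independent sums.
theorem pvFoldlFour {α : Type} (l : List α) (g0 g1 g2 g3 : α → Int) (a b c d : Int) :
    l.foldl (fun (h : Int × Int × Int × Int) i =>
        (h.1 + g0 i, h.2.1 + g1 i, h.2.2.1 + g2 i, h.2.2.2 + g3 i)) (a, b, c, d)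
      = (a + (l.map g0).sum, b + (l.map g1).sum, c + (l.map g2).sum, d + (l.map g3).sum) := by
  induction l generalizing a b c d with
  | nil => simp
  | cons x t ih => simp [List.foldl_cons, ih, add_assoc]

-- range-of-getD sum equals the slice-window sum.
theorem pvWindowSum (xs : List Int) (j m : Nat) (h : j + m ≤ xs.length) :
    ((List.range m).map (fun k => xs.getD (j + k) 0)).sum = ((xs.drop j).take m).sum := by
  congr 1
  apply List.ext_getElem
  · simpa using by omega
  · intro i h1 h2
    have hi : i < m := by simpa using h1
    have hjx : j + i < xs.length := by omega
    simp [List.getElem_take, List.getElem_drop, List.getD_eq_getElem?_getD,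
      List.getElem?_eq_getElem hjx]

-- ===== VERDICT (by name: the statement is the Claim_ definition above) =====
theorem find_not_tired_hobbit_spec : Claim_equal_find_not_tired_hobbit := by
  intro neighbor _
  unfold Spec_find_not_tired_hobbit find_not_tired_hobbit find_not_tired_hobbit_alt
  by_cases h : neighbor.length ≤ 3
  · have h1 : (neighbor.length : Int) - 3 ≤ 0 := by omega
    have h2 : max ((neighbor.length : Int) - 3) 0 = 0 := by omega
    rw [PySem.List.pyRange_one_eq_nil (by omega), h2]
    simp [PySem.List.pyRange_one, PySem.List.slice_toNat, List.range_succ]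
  · have h4 : 4 ≤ neighbor.length := by omega
    set m : Nat := neighbor.length - 3 with hm
    have hcast : (neighbor.length : Int) - 3 = (m : Int) := by omega
    have hmax : max ((m : Int)) 0 = (m : Int) := by omega
    rw [hcast, hmax, PySem.List.pyRange_one 0 (m : Int)]
    simp only [zero_add, sub_zero, List.foldl_map, Int.toNat_natCast]
    rw [pvFoldlFour]
    have key : ∀ j : Nat, j ≤ 3 →
        ((List.range m).map (fun k : Nat => PySem.List.pyGetD neighbor ((k : Int) + (j : Int)) 0)).sum
          = (PySem.List.slice neighbor (some (j : Int)) (some ((j : Int) + (m : Int)))).sum := by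
      intro j hj
      rw [PySem.List.slice_natCast_add]
      rw [← pvWindowSum neighbor j m (by omega)]
      congr 1
      apply List.map_congr_left
      intro k _
      have : (k : Int) + (j : Int) = ((j + k : Nat) : Int) := by push_cast; omega
      rw [this, PySem.List.pyGetD_natCast]
    have k0 := key 0 (by omega)
    have k1 := key 1 (by omega)
    have k2 := key 2 (by omega)
    have k3 := key 3 (by omega)
    simp only [Nat.cast_zero, Nat.cast_one, Nat.cast_ofNat, add_zero, zero_add] at k0 k1 k2 k3
    simp [PySem.List.pyRange_one, List.range_succ]
    refine ⟨?_, ?_, ?_, ?_⟩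
    · simpa using k0
    · simpa using k1
    · simpa using k2
    · simpa using k3
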